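-- pv_equiv track=rewrite | github.com/oliveira-teixeira/textlab | tests/test_textlab_analysis.py | calculate_cooccurrence
-- ===== SOURCE A (Python) =====
-- from collections import Counter
-- from typing import List, Dict, Set, Tuple
--
-- def calculate_cooccurrence(tokens: List[str], window_size: int = 5) -> Dict[Tuple[str, str], int]:
--     """
--     Calculate cooccurrence of words within a window.
--
--     Words within window_size positions of each other are considered cooccurring.
--
--     Args:
--         tokens: List of tokens
--         window_size: Size of context window
--
--     Returns:
--         Dictionary mapping (word1, word2) -> cooccurrence count
--     """
--     cooccurrence = Counter()
--
--     for i, word1 in enumerate(tokens):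
--         # Get window of surrounding words
--         start = max(0, i - window_size)
--         end = min(len(tokens), i + window_size + 1)
--
--         for j in range(start, end):
--             if i != j:
--                 word2 = tokens[j]
--                 # Create canonical pair (alphabetically ordered)
--                 pair = tuple(sorted([word1, word2]))
--                 cooccurrence[pair] += 1
--
--     return dict(cooccurrence)
-- ===== SOURCE B (Python) =====
-- def calculate_cooccurrence(tokens, window_size=5):
--     """Forward-only sliding-window scan: each unordered position pair is
--     visited once and counted with weight 2 (A visits it twice)."""
--     counts = {}
--     n = len(tokens)
--     for i in range(n):
--         w1 = tokens[i]
--         for j in range(i + 1, min(n, i + window_size + 1)):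
--             w2 = tokens[j]
--             pair = (w1, w2) if w1 <= w2 else (w2, w1)
--             counts[pair] = counts.get(pair, 0) + 2
--     return counts
-- ===== Notes on version B (the rewrite author's own statement) =====
-- stated objective: faster
-- what changed: Single forward-only scan: each unordered position pair within the window is visited once and counted with weight 2, instead of A's symmetric scan that visits every pair twice and re-sorts each word pair via sorted(); Counter is replaced by a plain dict.
import Mathlib
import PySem

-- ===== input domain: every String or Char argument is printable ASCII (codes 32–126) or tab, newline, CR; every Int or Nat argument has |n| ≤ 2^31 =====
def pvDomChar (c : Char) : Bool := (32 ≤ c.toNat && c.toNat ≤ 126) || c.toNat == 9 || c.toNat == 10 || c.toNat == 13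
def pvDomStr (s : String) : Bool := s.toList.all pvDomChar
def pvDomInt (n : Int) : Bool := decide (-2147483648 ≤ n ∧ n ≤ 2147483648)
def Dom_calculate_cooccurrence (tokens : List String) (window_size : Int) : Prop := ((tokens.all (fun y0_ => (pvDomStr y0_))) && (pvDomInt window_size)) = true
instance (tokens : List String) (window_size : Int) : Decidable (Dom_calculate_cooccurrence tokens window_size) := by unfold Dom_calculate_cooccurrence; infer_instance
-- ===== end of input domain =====

-- B replaces A's symmetric window scan (each unordered position pair visited twice, pair re-sorted
-- each time) by a forward-only scan that visits each position pair once and counts it with weight 2.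

-- ===== PORT A =====
-- tuple(sorted([word1, word2]))
def pySortPair (w1 w2 : String) : String × String :=
  match PySem.List.sorted [w1, w2] (fun x => x) with
  | [a, b] => (a, b)
  | _ => (w1, w2)   -- unreachable: sorted of a two-element list has two elements

def calculate_cooccurrence (tokens : List String) (window_size : Int) : List (String × String × Int) :=
  let cooccurrence : PySem.Dict (String × String) Int :=
    (PySem.List.enumerate tokens).foldl (fun d p =>
      let i := p.1
      let word1 := p.2
      let start := max 0 (i - window_size)
      let stop := min (PySem.List.len tokens) (i + window_size + 1)
      (PySem.List.pyRange start stop).foldl (fun d j =>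
        if i ≠ j then
          let word2 := PySem.List.pyGetD tokens j ""   -- j is always a valid index here
          d.modify (pySortPair word1 word2) 0 (fun x => x + 1)
        else d) d) PySem.Dict.empty
  cooccurrence.items.map (fun p => (p.1.1, p.1.2, p.2))

-- ===== PORT B =====
def calculate_cooccurrence_alt (tokens : List String) (window_size : Int) : List (String × String × Int) :=
  let n := PySem.List.len tokens
  let counts : PySem.Dict (String × String) Int :=
    (PySem.List.pyRange 0 n).foldl (fun d i =>
      let w1 := PySem.List.pyGetD tokens i ""
      (PySem.List.pyRange (i + 1) (min n (i + window_size + 1))).foldl (fun d j =>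
        let w2 := PySem.List.pyGetD tokens j ""
        let pair := if w1 ≤ w2 then (w1, w2) else (w2, w1)
        d.insert pair (d.getD pair 0 + 2)) d) PySem.Dict.empty
  counts.items.map (fun p => (p.1.1, p.1.2, p.2))

-- ===== PRECONDITION & SPEC =====
def Spec_calculate_cooccurrence (tokens : List String) (window_size : Int) (out : List (String × String × Int)) : Prop := out = calculate_cooccurrence_alt tokens window_size
instance (tokens : List String) (window_size : Int) (out : List (String × String × Int)) : Decidable (Spec_calculate_cooccurrence tokens window_size out) := by unfold Spec_calculate_cooccurrence; infer_instance

-- ===== CLAIM (what is proved, stated in full; the proofs are below) =====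
def Claim_equal_calculate_cooccurrence : Prop := ∀ (tokens : List String) (window_size : Int), Dom_calculate_cooccurrence tokens window_size → Spec_calculate_cooccurrence tokens window_size (calculate_cooccurrence tokens window_size)

-- ===== LEMMAS AND PROOFS =====

-- canonical (alphabetically ordered) pair, as B computes it
def prS (a b : String) : String × String := if a ≤ b then (a, b) else (b, a)

def pairAt (tokens : List String) (i j : Int) : String × String :=
  prS (PySem.List.pyGetD tokens i "") (PySem.List.pyGetD tokens j "")

def fwdIdx (tokens : List String) (ws i : Int) : List Int :=
  PySem.List.pyRange (i + 1) (min (PySem.List.len tokens) (i + ws + 1))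

def backIdx (ws i : Int) : List Int := PySem.List.pyRange (max 0 (i - ws)) i

def fwdEv (tokens : List String) (ws i : Int) : List (String × String) :=
  (fwdIdx tokens ws i).map (pairAt tokens i)

def backEv (tokens : List String) (ws i : Int) : List (String × String) :=
  (backIdx ws i).map (pairAt tokens i)

-- the streams of pair events produced by A and by B
def evA (tokens : List String) (ws : Int) : List (String × String) :=
  (PySem.List.pyRange 0 (PySem.List.len tokens)).flatMap
    (fun i => backEv tokens ws i ++ fwdEv tokens ws i)

def evB (tokens : List String) (ws : Int) : List (String × String) :=
  (PySem.List.pyRange 0 (PySem.List.len tokens)).flatMap (fun i => fwdEv tokens ws i)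

lemma sorted_two (a b : String) : PySem.List.sorted [a, b] (fun x => x) = if a ≤ b then [a, b] else [b, a] := by
  simp only [PySem.List.sorted, if_neg (by decide : ¬ (false = true)), List.foldl_cons, List.foldl_nil]
  by_cases h : a < b
  · simp [PySem.List.insertBy, le_of_lt h]
    intro hba
    exact absurd (String.lt_iff_toList_lt.mpr hba) (asymm h)
  · by_cases he : a = b
    · subst he; simp [PySem.List.insertBy]
    · have hba : b < a := by
        rcases lt_trichotomy a b with h' | h' | h' <;>
          first | exact absurd h' h | exact absurd h' he | exact h'
      simp [PySem.List.insertBy, not_le_of_gt hba]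
      intro hab
      exact absurd (String.le_iff_toList_le.mpr hab) (not_le_of_gt hba)

lemma pySortPair_eq (a b : String) : pySortPair a b = prS a b := by
  unfold pySortPair prS
  rw [sorted_two]
  by_cases h : a ≤ b <;> simp [h]

lemma prS_comm (a b : String) : prS a b = prS b a := by
  unfold prS
  by_cases h1 : a ≤ b <;> by_cases h2 : b ≤ a <;> simp [h1, h2]
  · exact ⟨le_antisymm h1 h2, le_antisymm h2 h1⟩
  · exact absurd (le_of_not_ge h1) h2

lemma pairAt_comm (tokens : List String) (i j : Int) : pairAt tokens i j = pairAt tokens j i :=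
  prS_comm _ _

lemma pyRange_nil {a b : Int} (h : b ≤ a) : PySem.List.pyRange a b = [] := by
  apply List.eq_nil_iff_forall_not_mem.mpr
  intro x hx
  have := PySem.List.mem_pyRange_one.mp hx
  omega

-- a loop with an `if` guard is a loop over the filtered list
lemma foldl_guard {α β : Type} (P : β → Prop) [DecidablePred P] (g : α → β → α) :
    ∀ (l : List β) (d : α),
      l.foldl (fun d j => if P j then g d j else d) d = (l.filter (fun j => decide (P j))).foldl g d := by
  intro l
  induction l with
  | nil => intro d; rfl
  | cons x xs ih =>
    intro d
    by_cases h : P x <;> simp [h, ih]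

lemma count_flatMap {α β : Type} [BEq β] [LawfulBEq β] (k : β) (l : List α) (f : α → List β) :
    ((l.flatMap f).count k : Int) = (l.map (fun i => ((f i).count k : Int))).sum := by
  induction l with
  | nil => simp
  | cons x xs ih => simp [List.flatMap_cons, List.count_append, ih]

-- A's inner index list, with the i = j guard applied, splits into backward ++ forward
lemma splitA (tokens : List String) (ws i : Int) (h0 : 0 ≤ i) (hn : i < PySem.List.len tokens) :
    (PySem.List.pyRange (max 0 (i - ws)) (min (PySem.List.len tokens) (i + ws + 1))).filter
        (fun j => decide (¬ i = j)) = backIdx ws i ++ fwdIdx tokens ws i := by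
  unfold backIdx fwdIdx
  set n := PySem.List.len tokens with hn'
  by_cases hws : 0 ≤ ws
  · have e1 : (PySem.List.pyRange (max 0 (i - ws)) i).filter (fun j => decide (¬ i = j)) =
        PySem.List.pyRange (max 0 (i - ws)) i := by
      apply List.filter_eq_self.mpr
      intro x hx; have := PySem.List.mem_pyRange_one.mp hx; simp; omega
    have e2 : (PySem.List.pyRange (i + 1) (min n (i + ws + 1))).filter (fun j => decide (¬ i = j)) =
        PySem.List.pyRange (i + 1) (min n (i + ws + 1)) := by
      apply List.filter_eq_self.mpr
      intro x hx; have := PySem.List.mem_pyRange_one.mp hx; simp; omega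
    rw [PySem.List.pyRange_one_append (max 0 (i - ws)) i (min n (i + ws + 1)) (by omega) (by omega),
        PySem.List.pyRange_one_append i (i + 1) (min n (i + ws + 1)) (by omega) (by omega),
        PySem.List.pyRange_one_cons (by omega : i < i + 1), pyRange_nil (by omega : i + 1 ≤ i + 1),
        List.filter_append, List.filter_append, e1, e2]
    simp
  · rw [pyRange_nil (by omega), pyRange_nil (by omega), pyRange_nil (by omega)]
    rfl

-- A's result is the Counter of its event stream
lemma A_eq_counter (tokens : List String) (ws : Int) :
    calculate_cooccurrence tokens ws =
      (PySem.Dict.counter (evA tokens ws)).items.map (fun p => (p.1.1, p.1.2, p.2)) := by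
  simp only [calculate_cooccurrence]
  rw [PySem.Dict.counter_eq_foldl]
  unfold evA
  rw [List.foldl_flatMap]
  rw [PySem.List.enumerate_eq_map_pyRange tokens "", List.foldl_map]
  congr 1
  congr 1
  apply PySem.List.foldl_congr_mem
  intro d i hi
  obtain ⟨hi0, hin⟩ := PySem.List.mem_pyRange_one.mp hi
  show (PySem.List.pyRange (max 0 (i - ws)) (min (PySem.List.len tokens) (i + ws + 1))).foldl
      (fun d j => if i ≠ j then
        d.modify (pySortPair (PySem.List.pyGetD tokens i "") (PySem.List.pyGetD tokens j "")) 0 (fun x => x + 1)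
      else d) d = _
  rw [foldl_guard (fun j => i ≠ j), splitA tokens ws i hi0 hin]
  unfold backEv fwdEv
  rw [← List.map_append, List.foldl_map]
  apply PySem.List.foldl_congr_mem
  intro acc j _
  rw [pySortPair_eq]
  rfl

lemma getD_add_two (l : List (String × String)) :
    ∀ (d : PySem.Dict (String × String) Int) (v : String × String),
      (l.foldl (fun d x => d.insert x (d.getD x 0 + 2)) d).getD v 0 = d.getD v 0 + 2 * l.count v := by
  induction l with
  | nil => intro d v; simp
  | cons x xs ih =>
    intro d v
    rw [List.foldl_cons, ih, PySem.Dict.getD_insert, List.count_cons]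
    by_cases hvx : v = x <;> simp [hvx] <;> first | ring | exact fun h => hvx h.symm

-- B's result, characterised
lemma B_items (tokens : List String) (ws : Int) :
    calculate_cooccurrence_alt tokens ws =
      ((PySem.Set.ofList (evB tokens ws)).map
        (fun k => (k, 2 * ((evB tokens ws).count k : Int)))).map (fun p => (p.1.1, p.1.2, p.2)) := by
  simp only [calculate_cooccurrence_alt]
  congr 1
  have hd : (PySem.List.pyRange 0 (PySem.List.len tokens)).foldl
      (fun d i =>
        (PySem.List.pyRange (i + 1) (min (PySem.List.len tokens) (i + ws + 1))).foldl
          (fun d j =>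
            d.insert
              (if PySem.List.pyGetD tokens i "" ≤ PySem.List.pyGetD tokens j "" then
                (PySem.List.pyGetD tokens i "", PySem.List.pyGetD tokens j "")
              else (PySem.List.pyGetD tokens j "", PySem.List.pyGetD tokens i ""))
              ((d.getD
                (if PySem.List.pyGetD tokens i "" ≤ PySem.List.pyGetD tokens j "" then
                  (PySem.List.pyGetD tokens i "", PySem.List.pyGetD tokens j "")
                else (PySem.List.pyGetD tokens j "", PySem.List.pyGetD tokens i "")) 0) + 2)) d)
        (PySem.Dict.empty : PySem.Dict (String × String) Int)
      = (evB tokens ws).foldl (fun d x => d.insert x (d.getD x 0 + 2)) PySem.Dict.empty := by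
    unfold evB
    rw [List.foldl_flatMap]
    apply PySem.List.foldl_congr_mem
    intro d i _
    unfold fwdEv fwdIdx
    rw [List.foldl_map]
    rfl
  rw [hd]
  have hnd : ((evB tokens ws).foldl (fun d x => d.insert x (d.getD x 0 + 2))
      (PySem.Dict.empty : PySem.Dict (String × String) Int)).keys.Nodup := by
    apply PySem.Dict.nodup_keys_foldl_insert
    simp [PySem.Dict.keys_empty]
  rw [PySem.Dict.items_eq_map_keys _ hnd 0, PySem.Dict.keys_foldl_insert, PySem.Dict.keys_empty]
  have hk : (PySem.Set.update ([] : PySem.Set (String × String)) (evB tokens ws)) =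
      PySem.Set.ofList (evB tokens ws) := rfl
  rw [hk]
  apply List.map_congr_left
  intro k _
  rw [getD_add_two]
  simp [PySem.Dict.getD_empty]

lemma count_map_int {α β : Type} [BEq β] [LawfulBEq β] [DecidableEq β] (k : β) (g : α → β) :
    ∀ l : List α, ((l.map g).count k : Int) = (l.map (fun j => if g j = k then (1 : Int) else 0)).sum := by
  intro l
  induction l with
  | nil => simp
  | cons x xs ih =>
    by_cases h : g x = k <;> simp [h, ih]; ring

lemma sum_map_pyRange (f : Int → Int) :
    ∀ (m : Nat) (a b : Int), b - a ≤ m →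
      ((PySem.List.pyRange a b).map f).sum = ∑ j ∈ Finset.Ico a b, f j := by
  intro m
  induction m with
  | zero =>
    intro a b h
    rw [pyRange_nil (by omega), Finset.Ico_eq_empty (by omega)]
    simp
  | succ m ih =>
    intro a b h
    by_cases hab : a < b
    · rw [PySem.List.pyRange_one_cons hab, ← Finset.insert_Ico_add_one_left_eq_Ico hab,
          Finset.sum_insert (by simp), List.map_cons, List.sum_cons, ih (a + 1) b (by omega)]
    · rw [pyRange_nil (by omega), Finset.Ico_eq_empty (by omega)]
      simp

lemma sum_Ico_guard (n lo hi : Int) (f : Int → Int) (h0 : 0 ≤ lo) (h1 : hi ≤ n) :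
    ∑ j ∈ Finset.Ico lo hi, f j = ∑ j ∈ Finset.Ico 0 n, if lo ≤ j ∧ j < hi then f j else 0 := by
  rw [← Finset.sum_filter]
  congr 1
  ext x
  simp only [Finset.mem_filter, Finset.mem_Ico]
  omega

lemma count_evA (tokens : List String) (ws : Int) (k : String × String) :
    ((evA tokens ws).count k : Int) = 2 * ((evB tokens ws).count k : Int) := by
  unfold evA evB
  rw [count_flatMap, count_flatMap]
  have e : (fun i => ((backEv tokens ws i ++ fwdEv tokens ws i).count k : Int)) =
      fun i => ((backEv tokens ws i).count k : Int) + ((fwdEv tokens ws i).count k : Int) := by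
    funext i
    rw [List.count_append]
    push_cast
    ring
  rw [e, PySem.List.sum_map_add_int]
  suffices h : ((PySem.List.pyRange 0 (PySem.List.len tokens)).map
        (fun i => ((backEv tokens ws i).count k : Int))).sum =
      ((PySem.List.pyRange 0 (PySem.List.len tokens)).map
        (fun i => ((fwdEv tokens ws i).count k : Int))).sum by
    rw [h]; ring
  set n := PySem.List.len tokens with hn
  have hB : (fun i => ((backEv tokens ws i).count k : Int)) =
      fun i => ∑ j ∈ Finset.Ico (max 0 (i - ws)) i, (if pairAt tokens i j = k then (1 : Int) else 0) := by
    funext i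
    rw [backEv, count_map_int, backIdx,
        sum_map_pyRange _ (i - max 0 (i - ws)).toNat _ _ (by omega)]
  have hF : (fun i => ((fwdEv tokens ws i).count k : Int)) =
      fun i => ∑ j ∈ Finset.Ico (i + 1) (min n (i + ws + 1)), (if pairAt tokens i j = k then (1 : Int) else 0) := by
    funext i
    rw [fwdEv, count_map_int, fwdIdx,
        sum_map_pyRange _ (min n (i + ws + 1) - (i + 1)).toNat _ _ (by omega)]
  rw [hB, hF, sum_map_pyRange _ n.toNat _ _ (by omega), sum_map_pyRange _ n.toNat _ _ (by omega)]
  rw [Finset.sum_congr rfl (fun i hi => by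
    have hi' := Finset.mem_Ico.mp hi
    exact sum_Ico_guard n (max 0 (i - ws)) i _ (by omega) (by omega))]
  have hR : (∑ i ∈ Finset.Ico 0 n, ∑ j ∈ Finset.Ico (i + 1) (min n (i + ws + 1)),
        (if pairAt tokens i j = k then (1 : Int) else 0))
      = ∑ i ∈ Finset.Ico 0 n, ∑ j ∈ Finset.Ico 0 n,
        (if i + 1 ≤ j ∧ j < min n (i + ws + 1) then (if pairAt tokens i j = k then (1 : Int) else 0) else 0) :=
    Finset.sum_congr rfl (fun i hi => by
      have hi' := Finset.mem_Ico.mp hi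
      exact sum_Ico_guard n (i + 1) (min n (i + ws + 1)) _ (by omega) (by omega))
  rw [hR]
  rw [Finset.sum_comm]
  apply Finset.sum_congr rfl
  intro i hi
  apply Finset.sum_congr rfl
  intro j hj
  rw [pairAt_comm tokens j i]
  have hi' := Finset.mem_Ico.mp hi
  have hj' := Finset.mem_Ico.mp hj
  split_ifs <;> first | rfl | omega

lemma add_mem_eq {α : Type} [BEq α] [LawfulBEq α] (s : PySem.Set α) (x : α) (h : x ∈ s) :
    PySem.Set.add s x = s := by
  simp [PySem.Set.add, PySem.Set.contains, h]

lemma mem_update_left {α : Type} [BEq α] [LawfulBEq α] (l : List α) :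
    ∀ (s : PySem.Set α) (x : α), x ∈ s → x ∈ PySem.Set.update s l := by
  induction l with
  | nil => intro s x h; exact h
  | cons y t ih =>
    intro s x h
    exact ih _ _ ((PySem.Set.mem_add s y x).mpr (Or.inl h))

lemma mem_update_right {α : Type} [BEq α] [LawfulBEq α] (l : List α) :
    ∀ (s : PySem.Set α) (x : α), x ∈ l → x ∈ PySem.Set.update s l := by
  induction l with
  | nil => intro s x h; cases h
  | cons y t ih =>
    intro s x h
    rcases List.mem_cons.mp h with h | h
    · subst h
      exact mem_update_left t _ x ((PySem.Set.mem_add s x x).mpr (Or.inr rfl))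
    · exact ih _ _ h

lemma update_eq_of_subset {α : Type} [BEq α] [LawfulBEq α] (l : List α) :
    ∀ (s : PySem.Set α), (∀ x ∈ l, x ∈ s) → PySem.Set.update s l = s := by
  induction l with
  | nil => intro s _; rfl
  | cons y t ih =>
    intro s h
    show PySem.Set.update (PySem.Set.add s y) t = s
    rw [add_mem_eq s y (h y List.mem_cons_self)]
    exact ih s (fun x hx => h x (List.mem_cons_of_mem y hx))

lemma update_append {α : Type} [BEq α] [LawfulBEq α] (s : PySem.Set α) (l1 l2 : List α) :
    PySem.Set.update s (l1 ++ l2) = PySem.Set.update (PySem.Set.update s l1) l2 :=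
  List.foldl_append

lemma setAux (tokens : List String) (ws : Int) :
    ∀ (m : Nat) (a : Int) (s : PySem.Set (String × String)), 0 ≤ a →
      PySem.List.len tokens - a ≤ m →
      (∀ j i : Int, 0 ≤ j → j < a → i ∈ fwdIdx tokens ws j → pairAt tokens j i ∈ s) →
      (PySem.List.pyRange a (PySem.List.len tokens)).foldl
        (fun s i => PySem.Set.update s (backEv tokens ws i ++ fwdEv tokens ws i)) s
      = (PySem.List.pyRange a (PySem.List.len tokens)).foldl
        (fun s i => PySem.Set.update s (fwdEv tokens ws i)) s := by
  intro m
  induction m with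
  | zero =>
    intro a s ha hm H
    rw [pyRange_nil (by omega)]
    rfl
  | succ m ih =>
    intro a s ha hm H
    by_cases hab : a < PySem.List.len tokens
    · rw [PySem.List.pyRange_one_cons hab]
      simp only [List.foldl_cons]
      have hback : PySem.Set.update s (backEv tokens ws a ++ fwdEv tokens ws a) =
          PySem.Set.update s (fwdEv tokens ws a) := by
        have hsub : PySem.Set.update s (backEv tokens ws a) = s := by
          apply update_eq_of_subset
          intro x hx
          obtain ⟨j, hj, rfl⟩ := List.mem_map.mp hx
          obtain ⟨hj1, hj2⟩ := PySem.List.mem_pyRange_one.mp hj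
          rw [pairAt_comm]
          apply H j a (by omega) (by omega)
          exact PySem.List.mem_pyRange_one.mpr ⟨by omega, by omega⟩
        rw [update_append, hsub]
      rw [hback]
      apply ih (a + 1) _ (by omega) (by omega)
      intro j i h0 hja hfwd
      by_cases hja' : j < a
      · exact mem_update_left _ _ _ (H j i h0 hja' hfwd)
      · have hje : j = a := by omega
        subst hje
        exact mem_update_right _ _ _ (List.mem_map_of_mem hfwd)
    · rw [pyRange_nil (by omega)]
      rfl

lemma set_evA (tokens : List String) (ws : Int) :
    PySem.Set.ofList (evA tokens ws) = PySem.Set.ofList (evB tokens ws) := by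
  unfold evA evB
  rw [PySem.Set.ofList_eq_foldl, PySem.Set.ofList_eq_foldl, List.foldl_flatMap, List.foldl_flatMap]
  have hlen : PySem.List.len tokens = (tokens.length : Int) := rfl
  exact setAux tokens ws (PySem.List.len tokens).toNat 0 [] (le_refl 0) (by omega)
    (fun j i h0 hj _ => absurd hj (by omega))

-- ===== VERDICT (by name: the statement is the Claim_ definition above) =====
theorem calculate_cooccurrence_spec : Claim_equal_calculate_cooccurrence := by
  intro tokens ws _
  show calculate_cooccurrence tokens ws = calculate_cooccurrence_alt tokens ws
  rw [A_eq_counter, B_items, PySem.Dict.items_counter, set_evA]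
  have h : (fun k => (k, ((evA tokens ws).count k : Int))) =
      (fun k => (k, 2 * ((evB tokens ws).count k : Int))) := by
    funext k; rw [count_evA]
  rw [h]
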